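-- pv_equiv track=rewrite | github.com/clschalkwyk/project-probo | probo/infra_detection.py | _in_to_out_latency
-- ===== SOURCE A (Python) =====
-- from typing import Dict, List, Optional
--
-- def _in_to_out_latency(in_times: List[int], out_times: List[int]) -> List[int]:
--     if not in_times or not out_times:
--         return []
--     in_times = sorted(in_times)
--     out_times = sorted(out_times)
--     latencies = []
--     j = 0
--     for t_in in in_times:
--         while j < len(out_times) and out_times[j] <= t_in:
--             j += 1
--         if j < len(out_times):
--             latencies.append(out_times[j] - t_in)
--     return latencies
-- ===== SOURCE B (Python) =====
-- # B: same sorts, but matching by per-element binary search (hand-written bisect_right)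
-- # instead of A's single two-pointer merge scan. Alternative algorithm, same O(n log n).
--
-- def _bisect_right(a, x):
--     lo, hi = 0, len(a)
--     while lo < hi:
--         mid = (lo + hi) // 2
--         if x < a[mid]:
--             hi = mid
--         else:
--             lo = mid + 1
--     return lo
--
--
-- def _in_to_out_latency(in_times, out_times):
--     out_sorted = sorted(out_times)
--     n = len(out_sorted)
--     latencies = []
--     for t_in in sorted(in_times):
--         k = _bisect_right(out_sorted, t_in)
--         if k < n:
--             latencies.append(out_sorted[k] - t_in)
--     return latencies
-- ===== Notes on version B (the rewrite author's own statement) =====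
-- stated objective: alternative
-- what changed: Replaced A's single two-pointer merge scan over the two sorted lists with an independent binary search (hand-written bisect_right) into the sorted out-times for each sorted in-time.
import Mathlib
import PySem

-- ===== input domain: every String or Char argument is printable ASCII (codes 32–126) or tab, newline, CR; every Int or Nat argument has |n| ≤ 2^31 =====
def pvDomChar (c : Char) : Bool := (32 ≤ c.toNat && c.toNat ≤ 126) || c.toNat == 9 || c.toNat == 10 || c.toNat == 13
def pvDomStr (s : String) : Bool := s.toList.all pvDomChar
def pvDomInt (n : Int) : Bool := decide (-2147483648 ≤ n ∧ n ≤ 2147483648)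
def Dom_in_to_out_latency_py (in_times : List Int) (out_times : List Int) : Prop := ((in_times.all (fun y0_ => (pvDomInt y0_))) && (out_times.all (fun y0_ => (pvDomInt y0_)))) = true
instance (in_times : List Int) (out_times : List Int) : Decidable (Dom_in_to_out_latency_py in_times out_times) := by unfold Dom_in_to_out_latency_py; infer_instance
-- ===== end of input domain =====

-- B replaces A's two-pointer merge scan with a per-element binary search into the
-- sorted out-times (alternative algorithm, same cost); proved to return the same list.


-- ===== PORT A =====
-- the `while j < len(out_times) and out_times[j] <= t_in: j += 1` loop
def pvAdvance (os : List Int) (t : Int) (j : Nat) : Nat :=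
  if _h : j < os.length then
    if os.getD j 0 ≤ t then pvAdvance os t (j + 1) else j
  else j
termination_by os.length - j

def in_to_out_latency_py (in_times : List Int) (out_times : List Int) : List Int :=
  if in_times = [] ∨ out_times = [] then []
  else
    let ins := PySem.List.sorted in_times (fun x => x)
    let os := PySem.List.sorted out_times (fun x => x)
    (ins.foldl (fun (st : Nat × List Int) t_in =>
        let j := pvAdvance os t_in st.1
        if j < os.length then (j, st.2 ++ [os.getD j 0 - t_in]) else (j, st.2))
      (0, [])).2

-- ===== PORT B =====
-- Source B's hand-written _bisect_right is exactly the lo/hi halving loop of PySem.List.bisectRight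
def in_to_out_latency_py_alt (in_times : List Int) (out_times : List Int) : List Int :=
  let os := PySem.List.sorted out_times (fun x => x)
  (PySem.List.sorted in_times (fun x => x)).foldl (fun latencies t_in =>
    let k := PySem.List.bisectRight os t_in
    if k < os.length then latencies ++ [os.getD k 0 - t_in] else latencies) []

-- ===== PRECONDITION & SPEC =====
def Spec_in_to_out_latency_py (in_times : List Int) (out_times : List Int) (out : List Int) : Prop := out = in_to_out_latency_py_alt in_times out_times
instance (in_times : List Int) (out_times : List Int) (out : List Int) : Decidable (Spec_in_to_out_latency_py in_times out_times out) := by unfold Spec_in_to_out_latency_py; infer_instance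

-- ===== CLAIM (what is proved, stated in full; the proofs are below) =====
def Claim_equal_in_to_out_latency_py : Prop := ∀ (in_times : List Int) (out_times : List Int), Dom_in_to_out_latency_py in_times out_times → Spec_in_to_out_latency_py in_times out_times (in_to_out_latency_py in_times out_times)

-- ===== LEMMAS AND PROOFS =====

-- bisect_right is monotone in the probe on a sorted list
lemma pvBisect_mono (os : List Int) (hs : os.Pairwise (· ≤ ·)) {t t' : Int} (h : t ≤ t') :
    PySem.List.bisectRight os t ≤ PySem.List.bisectRight os t' := by
  obtain ⟨hb1, hb2, hb3⟩ := PySem.List.bisectRight_spec os t hs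
  obtain ⟨hb1', hb2', hb3'⟩ := PySem.List.bisectRight_spec os t' hs
  by_contra hlt
  push Not at hlt
  have hidx : PySem.List.bisectRight os t' < os.length := lt_of_lt_of_le hlt hb1
  have h1 := hb2 _ hidx hlt
  have h2 := hb3' _ hidx le_rfl
  omega

-- A's while-loop, started at or before bisect_right, stops exactly at bisect_right
lemma pvAdvance_eq_bisect (os : List Int) (hs : os.Pairwise (· ≤ ·)) (t : Int) :
    ∀ j, j ≤ PySem.List.bisectRight os t → pvAdvance os t j = PySem.List.bisectRight os t := by
  obtain ⟨hb1, hb2, hb3⟩ := PySem.List.bisectRight_spec os t hs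
  intro j hj
  induction hn : os.length - j using Nat.strong_induction_on generalizing j with
  | _ n ih =>
    rw [pvAdvance]
    rcases Nat.lt_or_ge j os.length with hlen | hlen
    · simp only [hlen, dite_true]
      rcases Nat.lt_or_ge j (PySem.List.bisectRight os t) with hjb | hjb
      · have hle : os.getD j 0 ≤ t := by
          have := hb2 j hlen hjb
          simpa [List.getD, List.getElem?_eq_getElem hlen] using this
        rw [if_pos hle]
        exact ih (os.length - (j+1)) (by omega) (j+1) (by omega) rfl
      · have hjb' : j = PySem.List.bisectRight os t := le_antisymm (by omega) hjb
        have hgt : t < os.getD j 0 := by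
          have := hb3 j hlen hjb
          simpa [List.getD, List.getElem?_eq_getElem hlen] using this
        rw [if_neg (by omega)]
        exact hjb'
    · simp only [Nat.not_lt.mpr hlen, dite_false]
      omega

-- the fold invariant: starting from any j below every upcoming bisect point, A's fold
-- appends exactly what B's per-element fold appends
lemma pvFold_eq (os : List Int) (hs : os.Pairwise (· ≤ ·)) :
    ∀ (ins : List Int), ins.Pairwise (· ≤ ·) →
    ∀ (j : Nat) (acc : List Int), (∀ t ∈ ins, j ≤ PySem.List.bisectRight os t) →
    (ins.foldl (fun (st : Nat × List Int) t_in =>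
        let j := pvAdvance os t_in st.1
        if j < os.length then (j, st.2 ++ [os.getD j 0 - t_in]) else (j, st.2))
      (j, acc)).2
    = ins.foldl (fun latencies t_in =>
        let k := PySem.List.bisectRight os t_in
        if k < os.length then latencies ++ [os.getD k 0 - t_in] else latencies) acc := by
  intro ins hins
  induction ins with
  | nil => intro j acc _; rfl
  | cons t rest ih =>
    intro j acc hle
    have hjb : j ≤ PySem.List.bisectRight os t := hle t (by simp)
    have hadv := pvAdvance_eq_bisect os hs t j hjb
    have hrest : rest.Pairwise (· ≤ ·) := hins.tail
    have hmono : ∀ t' ∈ rest, PySem.List.bisectRight os t ≤ PySem.List.bisectRight os t' := by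
      intro t' ht'
      exact pvBisect_mono os hs (List.rel_of_pairwise_cons hins ht')
    simp only [List.foldl_cons, hadv]
    by_cases hk : PySem.List.bisectRight os t < os.length
    · simp only [hk]
      exact ih hrest _ _ hmono
    · simp only [hk]
      exact ih hrest _ _ hmono

-- ===== VERDICT (by name: the statement is the Claim_ definition above) =====
theorem in_to_out_latency_py_spec : Claim_equal_in_to_out_latency_py := by
  intro in_times out_times _
  unfold Spec_in_to_out_latency_py in_to_out_latency_py in_to_out_latency_py_alt
  by_cases hempty : in_times = [] ∨ out_times = []
  · rw [if_pos hempty]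
    rcases hempty with h | h
    · subst h; rfl
    · subst h
      simp [PySem.List.sorted]
  · rw [if_neg hempty]
    have h := (pvFold_eq _ (PySem.List.sorted_pairwise out_times (fun x => x))
      _ (PySem.List.sorted_pairwise in_times (fun x => x)) 0 []
      (fun _ _ => Nat.zero_le _))
    simpa using h
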